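-- pv_equiv track=rewrite | github.com/tonysimpson/mite | mite/scenario.py | _volume_dicts_remove_a_from_b
-- ===== SOURCE A (Python) =====
-- def _volume_dicts_remove_a_from_b(a, b):
--     diff = dict(b)
--     for scenario_id, current_num in a.items():
--         if scenario_id in diff:
--             diff[scenario_id] -= current_num
--             if diff[scenario_id] < 1:
--                 del diff[scenario_id]
--     return diff
-- ===== SOURCE B (Python) =====
-- def _volume_dicts_remove_a_from_b(a, b):
--     return {
--         k: (v - a[k] if k in a else v)
--         for k, v in b.items()
--         if k not in a or v - a[k] >= 1
--     }
-- ===== Notes on version B (the rewrite author's own statement) =====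
-- stated objective: simpler
-- what changed: Replaces copy-b-then-mutate (subtract, conditionally delete per key of a) with a single dict comprehension over b that looks each key up in a and filters; no intermediate mutation.
import Mathlib
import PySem

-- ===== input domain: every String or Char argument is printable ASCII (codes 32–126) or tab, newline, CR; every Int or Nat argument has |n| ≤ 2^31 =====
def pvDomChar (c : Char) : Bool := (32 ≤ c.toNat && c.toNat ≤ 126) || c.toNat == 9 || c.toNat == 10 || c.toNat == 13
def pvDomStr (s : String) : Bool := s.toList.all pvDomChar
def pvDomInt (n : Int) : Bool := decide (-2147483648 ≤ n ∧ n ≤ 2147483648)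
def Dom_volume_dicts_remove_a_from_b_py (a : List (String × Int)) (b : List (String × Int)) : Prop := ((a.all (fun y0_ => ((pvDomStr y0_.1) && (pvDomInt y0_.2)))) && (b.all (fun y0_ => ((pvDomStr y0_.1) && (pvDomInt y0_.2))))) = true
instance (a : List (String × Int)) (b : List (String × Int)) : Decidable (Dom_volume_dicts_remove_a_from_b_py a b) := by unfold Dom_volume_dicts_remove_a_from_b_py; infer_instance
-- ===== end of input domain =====

-- B replaces A's copy-b-then-mutate loop over a with a single comprehension over b
-- (lookup in a, filter); objective: simpler.


-- ===== PORT A =====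
-- diff = dict(b); for scenario_id, current_num in a.items(): if scenario_id in diff:
--   diff[scenario_id] -= current_num; if diff[scenario_id] < 1: del diff[scenario_id]
def volume_dicts_remove_a_from_b_py (a : List (String × Int)) (b : List (String × Int)) : List (String × Int) :=
  ((PySem.Dict.ofList a).items.foldl
    (fun diff p =>
      if diff.contains p.1 then
        let d2 := diff.insert p.1 (diff.getD p.1 0 - p.2)
        if d2.getD p.1 0 < 1 then d2.erase p.1 else d2
      else diff)
    (PySem.Dict.ofList b)).items

-- ===== PORT B =====
-- {k: (v - a[k] if k in a else v) for k, v in b.items() if k not in a or v - a[k] >= 1}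
def volume_dicts_remove_a_from_b_py_alt (a : List (String × Int)) (b : List (String × Int)) : List (String × Int) :=
  let da := PySem.Dict.ofList a
  (PySem.Dict.ofList b).items.filterMap (fun p =>
    match da.get? p.1 with
    | none => some p
    | some av => if 1 ≤ p.2 - av then some (p.1, p.2 - av) else none)

-- ===== PRECONDITION & SPEC =====
def Spec_volume_dicts_remove_a_from_b_py (a : List (String × Int)) (b : List (String × Int)) (out : List (String × Int)) : Prop := out = volume_dicts_remove_a_from_b_py_alt a b
instance (a : List (String × Int)) (b : List (String × Int)) (out : List (String × Int)) : Decidable (Spec_volume_dicts_remove_a_from_b_py a b out) := by unfold Spec_volume_dicts_remove_a_from_b_py; infer_instance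

-- ===== CLAIM (what is proved, stated in full; the proofs are below) =====
def Claim_equal_volume_dicts_remove_a_from_b_py : Prop := ∀ (a : List (String × Int)) (b : List (String × Int)), Dom_volume_dicts_remove_a_from_b_py a b → Spec_volume_dicts_remove_a_from_b_py a b (volume_dicts_remove_a_from_b_py a b)

-- ===== LEMMAS AND PROOFS =====

-- the body of A's loop, named for the proofs
def pvStep (diff : PySem.Dict String Int) (p : String × Int) : PySem.Dict String Int :=
  if diff.contains p.1 then
    let d2 := diff.insert p.1 (diff.getD p.1 0 - p.2)
    if d2.getD p.1 0 < 1 then d2.erase p.1 else d2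
  else diff

-- the body of B's comprehension, parameterised by the list of a's items
def pvF (l : List (String × Int)) (p : String × Int) : Option (String × Int) :=
  match (PySem.Dict.mk l).get? p.1 with
  | none => some p
  | some av => if 1 ≤ p.2 - av then some (p.1, p.2 - av) else none

lemma pvMain (l : List (String × Int)) : ∀ (e : PySem.Dict String Int),
    (l.map Prod.fst).Nodup → e.keys.Nodup →
    (l.foldl pvStep e).items = e.items.filterMap (pvF l) := by
  induction l with
  | nil =>
      intro e _ _
      simp [pvF, PySem.Dict.get?, List.filterMap_some]
  | cons hd t ih =>
      intro e hnd he
      obtain ⟨k, av⟩ := hd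
      simp only [List.map_cons, List.nodup_cons] at hnd
      obtain ⟨hk, ht⟩ := hnd
      have hgetT : (PySem.Dict.mk t).get? k = none := by
        rw [PySem.Dict.get?_eq_none_iff_not_mem_keys]
        simpa [PySem.Dict.keys] using hk
      have hFcons : ∀ p : String × Int, pvF ((k, av) :: t) p =
          (if p.1 = k then (if 1 ≤ p.2 - av then some (p.1, p.2 - av) else none)
           else pvF t p) := by
        intro p
        by_cases h : p.1 = k
        · simp [pvF, PySem.Dict.get?_mk_cons, h]
        · simp [pvF, PySem.Dict.get?_mk_cons, Ne.symm h, h]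
      rw [List.foldl_cons]
      by_cases hc : e.contains k = true
      · -- k present in the current diff
        have hv0 : ∀ p ∈ e.items, p.1 = k → e.getD k 0 = p.2 := by
          intro p hp h1
          have : (k, p.2) ∈ e.items := by
            have : p = (k, p.2) := by cases p; simp_all
            rwa [← this]
          exact PySem.Dict.getD_of_mem_items e this he 0
        set w := e.getD k 0 - av with hw
        have hins : (e.insert k w).items
            = e.items.map (fun p => if p.1 == k then (k, w) else p) :=
          PySem.Dict.items_insert_of_contains e w hc
        have hstep : pvStep e (k, av) =
            (if w < 1 then (e.insert k w).erase k else e.insert k w) := by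
          simp [pvStep, hc, hw]
        by_cases hlt : w < 1
        · -- entry deleted
          have hitems : (pvStep e (k, av)).items
              = e.items.filter (fun p => !(p.1 == k)) := by
            rw [hstep, if_pos hlt]
            show List.filter _ (e.insert k w).items = _
            rw [hins]
            rw [show (List.filter (fun p : String × Int => !p.1 == k)
                (List.map (fun p : String × Int => if (p.1 == k) = true then (k, w) else p) e.items))
              = List.filterMap (fun p : String × Int =>
                  if (!p.1 == k) = true then some p else none) e.items from ?_,
              ← List.filterMap_eq_filter]
            · rfl
            · rw [← List.filterMap_eq_filter, List.filterMap_map]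
              apply List.filterMap_congr
              intro p _
              by_cases h : p.1 = k <;> simp [h]
          have hkeys : (pvStep e (k, av)).keys.Nodup := by
            have : (pvStep e (k, av)).keys.Sublist e.keys := by
              show ((pvStep e (k, av)).items.map Prod.fst).Sublist (e.items.map Prod.fst)
              rw [hitems]
              exact List.Sublist.map Prod.fst List.filter_sublist
            exact this.nodup he
          rw [ih _ ht hkeys, hitems, List.filterMap_filter]
          apply List.filterMap_congr
          intro p hp
          rw [hFcons]
          by_cases h : p.1 = k
          · have : ¬ (1 ≤ p.2 - av) := by
              have := hv0 p hp h
              omega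
            simp [h, this]
          · simp [h]
        · -- entry kept with new value
          have hitems : (pvStep e (k, av)).items
              = e.items.map (fun p => if p.1 == k then (k, w) else p) := by
            rw [hstep, if_neg hlt, hins]
          have hkeys : (pvStep e (k, av)).keys.Nodup := by
            show ((pvStep e (k, av)).items.map Prod.fst).Nodup
            rw [hitems, List.map_map]
            have : (Prod.fst ∘ fun p : String × Int => if p.1 == k then (k, w) else p)
                = Prod.fst := by
              funext p
              by_cases h : p.1 = k <;> simp [h]
            rw [this]
            exact he
          rw [ih _ ht hkeys, hitems, List.filterMap_map]
          apply List.filterMap_congr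
          intro p hp
          rw [hFcons]
          by_cases h : p.1 = k
          · have hp2 : e.getD k 0 = p.2 := hv0 p hp h
            have hw2 : w = p.2 - av := by rw [hw, hp2]
            have h1 : 1 ≤ p.2 - av := by omega
            simp [Function.comp, pvF, hgetT, h1, hw2, h]
          · simp [Function.comp, h, pvF]
      · -- k absent: the loop body does nothing
        have hstep : pvStep e (k, av) = e := by simp [pvStep, hc]
        rw [hstep, ih _ ht he]
        apply List.filterMap_congr
        intro p hp
        rw [hFcons]
        have : p.1 ∈ e.keys := PySem.Dict.mem_keys_of_mem_items e hp
        have hne : p.1 ≠ k := by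
          intro h
          exact hc ((PySem.Dict.contains_iff_mem_keys e k).mpr (h ▸ this))
        simp [hne]

-- ===== VERDICT (by name: the statement is the Claim_ definition above) =====
theorem volume_dicts_remove_a_from_b_py_spec : Claim_equal_volume_dicts_remove_a_from_b_py := by
  intro a b _
  show volume_dicts_remove_a_from_b_py a b = volume_dicts_remove_a_from_b_py_alt a b
  have hnd : ((PySem.Dict.ofList a).items.map Prod.fst).Nodup :=
    PySem.Dict.nodup_keys_ofList a
  have hb : (PySem.Dict.ofList b : PySem.Dict String Int).keys.Nodup :=
    PySem.Dict.nodup_keys_ofList b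
  exact pvMain (PySem.Dict.ofList a).items (PySem.Dict.ofList b) hnd hb
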